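-- pv_equiv track=rewrite | github.com/SANGAVI-KRISH/-Graph-Edge-Coloring | Graph Edge Coloring/GRAPH/EdgeColoring/GraphStructure/graph.py | sibling
-- ===== SOURCE A (Python) =====
-- def sibling(n):
--     graph = {i: [] for i in range(n)}
--     for i in range(n):
--         left_child = 2 * i + 1
--         right_child = 2 * i + 2
--         if left_child < n:
--             graph[i].append(left_child)
--         if right_child < n:
--             graph[i].append(right_child)
--         if left_child < n and right_child < n:
--             graph[left_child].append(right_child)
--             graph[right_child].append(left_child)
--     return graph
-- ===== SOURCE B (Python) =====
-- def _nbrs(n, k):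
--     nbrs = []
--     if k > 0:
--         if k % 2 == 1:
--             if k + 1 < n:
--                 nbrs.append(k + 1)
--         else:
--             nbrs.append(k - 1)
--     if 2 * k + 1 < n:
--         nbrs.append(2 * k + 1)
--     if 2 * k + 2 < n:
--         nbrs.append(2 * k + 2)
--     return nbrs
--
--
-- def sibling(n):
--     graph = {}
--     for k in range(n):
--         graph[k] = _nbrs(n, k)
--     return graph
-- ===== Notes on version B (the rewrite author's own statement) =====
-- stated objective: simpler
-- what changed: Replaces the scatter-style loop that appends edges into three different dict entries per iteration with a gather-style single pass that computes each node's full neighbor list (sibling, then children) locally and assigns it once.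
import Mathlib
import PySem

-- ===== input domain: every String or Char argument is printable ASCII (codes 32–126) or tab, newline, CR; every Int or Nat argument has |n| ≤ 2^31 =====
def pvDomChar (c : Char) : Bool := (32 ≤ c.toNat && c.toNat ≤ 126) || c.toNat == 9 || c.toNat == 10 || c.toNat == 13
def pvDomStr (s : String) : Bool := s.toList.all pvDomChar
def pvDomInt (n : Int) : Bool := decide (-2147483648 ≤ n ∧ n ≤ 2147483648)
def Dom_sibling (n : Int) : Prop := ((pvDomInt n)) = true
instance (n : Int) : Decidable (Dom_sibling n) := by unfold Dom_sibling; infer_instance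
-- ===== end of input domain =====

-- B gathers each node's neighbor list directly (sibling, then children) instead of A's
-- scattering of appends into three dict entries per iteration; same cost, simpler.

-- ===== PORT A =====
-- one iteration of A's loop body
def siblingStep (n : Int) (g : PySem.Dict Int (List Int)) (i : Int) : PySem.Dict Int (List Int) :=
  let lc := 2 * i + 1
  let rc := 2 * i + 2
  let g := if lc < n then g.modify i [] (fun l => l ++ [lc]) else g
  let g := if rc < n then g.modify i [] (fun l => l ++ [rc]) else g
  if lc < n ∧ rc < n then
    (g.modify lc [] (fun l => l ++ [rc])).modify rc [] (fun l => l ++ [lc])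
  else g

def sibling (n : Int) : List (Int × List Int) :=
  let graph := (PySem.List.pyRange 0 n 1).foldl
    (fun g i => g.insert i ([] : List Int)) PySem.Dict.empty
  ((PySem.List.pyRange 0 n 1).foldl (siblingStep n) graph).items

-- ===== PORT B =====
-- helper _nbrs of Source B
def sibNbrs (n k : Int) : List Int :=
  (if 0 < k then
     (if PySem.Int.mod k 2 = 1 then (if k + 1 < n then [k + 1] else []) else [k - 1])
   else [])
  ++ (if 2 * k + 1 < n then [2 * k + 1] else [])
  ++ (if 2 * k + 2 < n then [2 * k + 2] else [])

def sibling_alt (n : Int) : List (Int × List Int) :=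
  ((PySem.List.pyRange 0 n 1).foldl
    (fun g k => g.insert k (sibNbrs n k)) PySem.Dict.empty).items

-- ===== PRECONDITION & SPEC =====
def Spec_sibling (n : Int) (out : List (Int × List Int)) : Prop := out = sibling_alt n
instance (n : Int) (out : List (Int × List Int)) : Decidable (Spec_sibling n out) := by unfold Spec_sibling; infer_instance

-- ===== CLAIM (what is proved, stated in full; the proofs are below) =====
def Claim_equal_sibling : Prop := ∀ (n : Int), Dom_sibling n → Spec_sibling n (sibling n)

-- ===== LEMMAS AND PROOFS =====

-- contribution of iteration i of A's loop to the list at key k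
def sibContrib (n i k : Int) : List Int :=
  (if i = k then
     (if 2 * i + 1 < n then [2 * i + 1] else []) ++ (if 2 * i + 2 < n then [2 * i + 2] else [])
   else [])
  ++ (if 2 * i + 1 < n ∧ 2 * i + 2 < n then
        (if k = 2 * i + 1 then [2 * i + 2] else if k = 2 * i + 2 then [2 * i + 1] else [])
      else [])

theorem getD_siblingStep (n : Int) (g : PySem.Dict Int (List Int)) (i k : Int) (hi : 0 ≤ i) :
    (siblingStep n g i).getD k [] = g.getD k [] ++ sibContrib n i k := by
  have hii1 : i ≠ 2*i+1 := by omega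
  have hii2 : i ≠ 2*i+2 := by omega
  have h12 : (2*i+1 : Int) ≠ 2*i+2 := by omega
  unfold siblingStep sibContrib
  by_cases h1 : 2*i+1 < n <;> by_cases h2 : 2*i+2 < n <;>
  by_cases hk0 : k = i <;> by_cases hk1 : k = 2*i+1 <;> by_cases hk2 : k = 2*i+2 <;>
    first
      | omega
      | (subst_vars
         simp [PySem.Dict.getD_modify, h1, h2, hii1, hii2, h12,
               Ne.symm hii1, Ne.symm hii2, Ne.symm h12, *]
         all_goals omega)

theorem keys_siblingStep (n : Int) (g : PySem.Dict Int (List Int)) (i : Int) (hi : 0 ≤ i)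
    (hmem : ∀ j : Int, 0 ≤ j → j < n → j ∈ g.keys) :
    (siblingStep n g i).keys = g.keys := by
  by_cases h1 : 2*i+1 < n <;> by_cases h2 : 2*i+2 < n
  · have mi : i ∈ g.keys := hmem i hi (by omega)
    have ml : 2*i+1 ∈ g.keys := hmem _ (by omega) h1
    have mr : 2*i+2 ∈ g.keys := hmem _ (by omega) h2
    simp [siblingStep, h1, h2, PySem.Dict.keys_modify, PySem.Dict.keys_insert_of_contains,
          PySem.Dict.contains_modify, PySem.Dict.contains_iff_mem_keys, mi, ml, mr]
  · have mi : i ∈ g.keys := hmem i hi (by omega)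
    simp [siblingStep, h1, h2, PySem.Dict.keys_modify, PySem.Dict.keys_insert_of_contains,
          PySem.Dict.contains_modify, PySem.Dict.contains_iff_mem_keys, mi]
  · have mi : i ∈ g.keys := hmem i hi (by omega)
    simp [siblingStep, h1, h2, PySem.Dict.keys_modify, PySem.Dict.keys_insert_of_contains,
          PySem.Dict.contains_modify, PySem.Dict.contains_iff_mem_keys, mi]
  · simp [siblingStep, h1, h2]

theorem keys_foldl_siblingStep (n : Int) (l : List Int) :
    ∀ (g : PySem.Dict Int (List Int)), (∀ i ∈ l, 0 ≤ i) →
      (∀ j : Int, 0 ≤ j → j < n → j ∈ g.keys) →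
      (l.foldl (siblingStep n) g).keys = g.keys := by
  induction l with
  | nil => intro g _ _; rfl
  | cons i l ih =>
    intro g hl hmem
    have hstep := keys_siblingStep n g i (hl i List.mem_cons_self) hmem
    rw [List.foldl_cons, ih _ (fun j hj => hl j (List.mem_cons_of_mem _ hj))
        (fun j h0 hn => by rw [hstep]; exact hmem j h0 hn), hstep]

theorem getD_foldl_siblingStep (n k : Int) (l : List Int) (g : PySem.Dict Int (List Int))
    (hl : ∀ i ∈ l, 0 ≤ i) :
    (l.foldl (siblingStep n) g).getD k [] = g.getD k [] ++ l.flatMap (fun i => sibContrib n i k) := by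
  induction l generalizing g with
  | nil => simp
  | cons i l ih =>
    simp only [List.foldl_cons, List.flatMap_cons]
    rw [ih _ (fun j hj => hl j (List.mem_cons_of_mem _ hj)),
        getD_siblingStep n g i k (hl i List.mem_cons_self), List.append_assoc]

theorem flatMap_sibContrib (n k : Int) (hk0 : 0 ≤ k) (hkn : k < n) :
    ∀ (m : Nat),
      (PySem.List.pyRange 0 (m : Int) 1).flatMap (fun i => sibContrib n i k) =
        (if k ≤ 2 * (m : Int) then
           (if 0 < k then
              (if k % 2 = 1 then (if k + 1 < n then [k + 1] else []) else [k - 1])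
            else [])
         else [])
        ++ (if k < (m : Int) then
              (if 2 * k + 1 < n then [2 * k + 1] else []) ++ (if 2 * k + 2 < n then [2 * k + 2] else [])
            else []) := by
  intro m
  induction m with
  | zero =>
    rw [show ((0 : Nat) : Int) = 0 from rfl, PySem.List.pyRange_one_eq_nil le_rfl]
    simp only [List.flatMap_nil]
    split_ifs <;> simp_all <;> omega
  | succ m ih =>
    have hm0 : (0 : Int) ≤ (m : Int) := by positivity
    rw [show ((m + 1 : Nat) : Int) = (m : Int) + 1 by push_cast; ring,
        PySem.List.pyRange_one_succ_right hm0, List.flatMap_append, ih]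
    simp only [List.flatMap_cons, List.flatMap_nil, List.append_nil]
    by_cases he : (m : Int) = k
    · subst he
      have c1 : (m : Int) ≤ 2 * (m : Int) := by omega
      have c2 : ¬ (m : Int) < (m : Int) := by omega
      have c3 : (m : Int) ≤ 2 * ((m : Int) + 1) := by omega
      have c4 : (m : Int) < (m : Int) + 1 := by omega
      have c5 : ¬ (m : Int) = 2 * (m : Int) + 1 := by omega
      have c6 : ¬ (m : Int) = 2 * (m : Int) + 2 := by omega
      simp [sibContrib, c1, c2, c3, c4, c5, c6]
    · by_cases hm1 : k = 2 * (m : Int) + 1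
      · subst hm1
        have c1 : ¬ 2 * (m : Int) + 1 ≤ 2 * (m : Int) := by omega
        have c2 : ¬ 2 * (m : Int) + 1 < (m : Int) := by omega
        have c3 : 2 * (m : Int) + 1 ≤ 2 * ((m : Int) + 1) := by omega
        have c4 : ¬ 2 * (m : Int) + 1 < (m : Int) + 1 := by omega
        have c5 : (0 : Int) < 2 * (m : Int) + 1 := by omega
        have c6 : (2 * (m : Int) + 1) % 2 = 1 := by omega
        have c7 : 2 * (m : Int) + 1 < n := by omega
        have c8 : 2 * (m : Int) + 1 + 1 = 2 * (m : Int) + 2 := by ring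
        simp [sibContrib, he, c1, c2, c3, c4, c5, c6, c7, c8]
      · by_cases hm2 : k = 2 * (m : Int) + 2
        · subst hm2
          have c1 : ¬ 2 * (m : Int) + 2 ≤ 2 * (m : Int) := by omega
          have c2 : ¬ 2 * (m : Int) + 2 < (m : Int) := by omega
          have c3 : 2 * (m : Int) + 2 ≤ 2 * ((m : Int) + 1) := by omega
          have c4 : ¬ 2 * (m : Int) + 2 < (m : Int) + 1 := by omega
          have c5 : (0 : Int) < 2 * (m : Int) + 2 := by omega
          have c6 : ¬ (2 * (m : Int) + 2) % 2 = 1 := by omega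
          have c7 : 2 * (m : Int) + 1 < n := by omega
          have c8 : 2 * (m : Int) + 2 < n := by omega
          have c9 : ¬ (2 * (m : Int) + 2 = 2 * (m : Int) + 1) := by omega
          have c10 : 2 * (m : Int) + 2 - 1 = 2 * (m : Int) + 1 := by ring
          simp [sibContrib, he, c1, c2, c3, c4, c5, c6, c7, c8, c9, c10]
        · have hz : sibContrib n (m : Int) k = [] := by
            simp [sibContrib, he, hm1, hm2]
          rw [hz, List.append_nil]
          by_cases hA : k ≤ 2 * (m : Int) <;> by_cases hB : k < (m : Int)
          · have hA' : k ≤ 2 * ((m : Int) + 1) := by omega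
            have hB' : k < (m : Int) + 1 := by omega
            simp [hA, hB, hA', hB']
          · have hA' : k ≤ 2 * ((m : Int) + 1) := by omega
            have hB' : ¬ k < (m : Int) + 1 := by omega
            simp [hA, hB, hA', hB']
          · omega
          · have hA' : ¬ k ≤ 2 * ((m : Int) + 1) := by omega
            have hB' : ¬ k < (m : Int) + 1 := by omega
            simp [hA, hB, hA', hB']

theorem items_sibling_alt (n : Int) :
    sibling_alt n = (PySem.List.pyRange 0 n 1).map (fun k => (k, sibNbrs n k)) := by
  unfold sibling_alt
  have h := PySem.Dict.items_foldl_insert_fresh (PySem.List.pyRange 0 n 1) (fun x => x)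
    (fun k => sibNbrs n k) PySem.Dict.empty
    (by intro a _; simp [PySem.Dict.contains_empty])
    (by simpa using PySem.List.nodup_pyRange_one 0 n)
  simpa using h

theorem items_initial (n : Int) :
    ((PySem.List.pyRange 0 n 1).foldl (fun g i => g.insert i ([] : List Int))
        PySem.Dict.empty).items = (PySem.List.pyRange 0 n 1).map (fun k => (k, ([] : List Int))) := by
  have h := PySem.Dict.items_foldl_insert_fresh (PySem.List.pyRange 0 n 1) (fun x => x)
    (fun _ => ([] : List Int)) PySem.Dict.empty
    (by intro a _; simp [PySem.Dict.contains_empty])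
    (by simpa using PySem.List.nodup_pyRange_one 0 n)
  simpa using h

-- ===== VERDICT (by name: the statement is the Claim_ definition above) =====
theorem sibling_spec : Claim_equal_sibling := by
  intro n _
  unfold Spec_sibling
  rw [items_sibling_alt]
  unfold sibling
  have hitems0 := items_initial n
  set d0 := (PySem.List.pyRange 0 n 1).foldl (fun g i => g.insert i ([] : List Int))
    PySem.Dict.empty with hd0
  have hkeys0 : d0.keys = PySem.List.pyRange 0 n 1 := by
    show d0.items.map Prod.fst = _
    rw [hitems0, List.map_map]
    exact List.map_id'' (fun x => rfl) _
  have hnodup : d0.keys.Nodup := by rw [hkeys0]; exact PySem.List.nodup_pyRange_one 0 n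
  have hmem : ∀ j : Int, 0 ≤ j → j < n → j ∈ d0.keys := by
    intro j h0 hn
    rw [hkeys0]
    exact PySem.List.mem_pyRange_one.mpr ⟨h0, hn⟩
  have hget0 : ∀ k ∈ PySem.List.pyRange 0 n 1, d0.getD k [] = [] := by
    intro k hk
    exact PySem.Dict.getD_of_mem_items d0
      (by rw [hitems0]; exact List.mem_map_of_mem hk) hnodup []
  have hkeys : ((PySem.List.pyRange 0 n 1).foldl (siblingStep n) d0).keys
      = PySem.List.pyRange 0 n 1 := by
    rw [keys_foldl_siblingStep n _ d0 (fun i hi => (PySem.List.mem_pyRange_one.mp hi).1) hmem,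
        hkeys0]
  rw [PySem.Dict.items_eq_map_keys _ (by rw [hkeys]; exact PySem.List.nodup_pyRange_one 0 n) []]
  rw [hkeys]
  apply List.map_congr_left
  intro k hk
  have hkb := PySem.List.mem_pyRange_one.mp hk
  rw [getD_foldl_siblingStep n k _ d0
      (fun i hi => (PySem.List.mem_pyRange_one.mp hi).1), hget0 k hk]
  have hn0 : 0 ≤ n := le_trans hkb.1 (le_of_lt hkb.2)
  have hcast : ((n.toNat : Nat) : Int) = n := Int.toNat_of_nonneg hn0
  rw [show PySem.List.pyRange 0 n 1 = PySem.List.pyRange 0 ((n.toNat : Nat) : Int) 1 by rw [hcast]]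
  rw [flatMap_sibContrib n k hkb.1 hkb.2 n.toNat]
  rw [hcast]
  unfold sibNbrs
  rw [PySem.Int.mod_eq_emod_of_pos (by norm_num)]
  have h1 : k ≤ 2 * n := by omega
  have h2 : k < n := hkb.2
  simp [h1, h2, List.nil_append]
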